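-- pv_equiv track=rewrite | github.com/seonjiwon/Python-Algorithm | algorithm/math/[Silver2] 조합_0의_계수_2004.py | count_zeros
-- ===== SOURCE A (Python) =====
-- def count_zeros(n, m):
--   def count_factors(num, factor):
--     count = 0
--     while num > 0:
--       count += num//factor
--       num //= factor
--     return count
--   twos_n = count_factors(n, 2)
--   fives_n = count_factors(n, 5)
--
--   twos_m = count_factors(m, 2)
--   fives_m = count_factors(m, 5)
--
--   twos_nm = count_factors(n-m, 2)
--   fives_nm = count_factors(n-m, 5)
--
--   twos = twos_n - (twos_m + twos_nm)
--   fives = fives_n - (fives_m + fives_nm)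
--
--   return min(twos, fives)
-- ===== SOURCE B (Python) =====
-- def count_zeros(n, m):
--     def legendre(k, p):
--         # exponent of prime p in k! via the digit-sum closed form (k - s_p(k)) / (p - 1)
--         if k <= 0:
--             return 0
--         k0, s = k, 0
--         while k:
--             s += k % p
--             k //= p
--         return (k0 - s) // (p - 1)
--     twos = legendre(n, 2) - legendre(m, 2) - legendre(n - m, 2)
--     fives = legendre(n, 5) - legendre(m, 5) - legendre(n - m, 5)
--     return min(twos, fives)
-- ===== Notes on version B (the rewrite author's own statement) =====
-- stated objective: alternative
-- what changed: Replaces A's quotient-summation loop (sum of k//p, k//p^2, ...) by Legendre's digit-sum closed form: accumulate the base-p digit sum s in one loop and return (k - s)//(p - 1).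
import Mathlib
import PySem

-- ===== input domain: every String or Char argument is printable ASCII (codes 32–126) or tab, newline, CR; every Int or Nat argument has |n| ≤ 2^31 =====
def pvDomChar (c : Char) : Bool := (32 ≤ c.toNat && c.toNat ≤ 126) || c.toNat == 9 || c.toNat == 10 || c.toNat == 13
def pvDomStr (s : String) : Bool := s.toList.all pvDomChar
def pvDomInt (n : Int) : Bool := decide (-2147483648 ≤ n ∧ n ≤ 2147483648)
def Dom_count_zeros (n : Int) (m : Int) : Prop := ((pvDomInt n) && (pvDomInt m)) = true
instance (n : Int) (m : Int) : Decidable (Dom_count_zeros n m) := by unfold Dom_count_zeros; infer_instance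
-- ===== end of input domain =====

-- B replaces A's quotient-summation loop by Legendre's digit-sum closed form (k - s_p(k))/(p-1); same cost, alternative algorithm.

-- termination helper for the two loops (cited by the ports' decreasing_by)
theorem pv_floordiv_toNat_lt (a b : Int) (ha : 0 < a) (hb : 2 ≤ b) :
    (PySem.Int.floordiv a b).toNat < a.toNat := by
  have h1 : PySem.Int.floordiv a b < a :=
    (PySem.Int.floordiv_lt_iff_lt_mul (by omega)).mpr (by nlinarith)
  have h2 : (0:Int) ≤ PySem.Int.floordiv a b :=
    (PySem.Int.le_floordiv_iff_mul_le (by omega)).mpr (by omega)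
  omega

-- ===== PORT A =====
-- A's inner while loop `count += num//factor; num //= factor`; the `2 ≤ factor`
-- conjunct is a totality guard only (A calls it solely with factor ∈ {2, 5}).
def count_factors (num : Int) (factor : Int) : Int :=
  if _h : 0 < num ∧ 2 ≤ factor then
    PySem.Int.floordiv num factor + count_factors (PySem.Int.floordiv num factor) factor
  else 0
termination_by num.toNat
decreasing_by exact pv_floordiv_toNat_lt _ _ _h.1 _h.2

def count_zeros (n : Int) (m : Int) : Int :=
  min (count_factors n 2 - (count_factors m 2 + count_factors (n - m) 2))
      (count_factors n 5 - (count_factors m 5 + count_factors (n - m) 5))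

-- ===== PORT B =====
-- B's `while k: s += k % p; k //= p`; since the loop is entered with k > 0 and
-- p ≥ 2 keeps k nonnegative, `k ≠ 0` is `0 < k` here; `2 ≤ p` is a totality guard.
def digit_sum (k : Int) (p : Int) : Int :=
  if _h : 0 < k ∧ 2 ≤ p then
    PySem.Int.mod k p + digit_sum (PySem.Int.floordiv k p) p
  else 0
termination_by k.toNat
decreasing_by exact pv_floordiv_toNat_lt _ _ _h.1 _h.2

def legendre (k : Int) (p : Int) : Int :=
  if k ≤ 0 then 0
  else PySem.Int.floordiv (k - digit_sum k p) (p - 1)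

def count_zeros_alt (n : Int) (m : Int) : Int :=
  min (legendre n 2 - legendre m 2 - legendre (n - m) 2)
      (legendre n 5 - legendre m 5 - legendre (n - m) 5)

-- ===== PRECONDITION & SPEC =====
def Spec_count_zeros (n : Int) (m : Int) (out : Int) : Prop := out = count_zeros_alt n m
instance (n : Int) (m : Int) (out : Int) : Decidable (Spec_count_zeros n m out) := by unfold Spec_count_zeros; infer_instance

-- ===== CLAIM (what is proved, stated in full; the proofs are below) =====
def Claim_equal_count_zeros : Prop := ∀ (n : Int) (m : Int), Dom_count_zeros n m → Spec_count_zeros n m (count_zeros n m)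

-- ===== LEMMAS AND PROOFS =====

-- Legendre's identity: k - s_p(k) = (p-1) · e_p(k!) for k > 0.
theorem sub_digit_sum (p : Int) (hp : 2 ≤ p) (k : Int) (hk : 0 < k) :
    k - digit_sum k p = (p - 1) * count_factors k p := by
  have hq := PySem.Int.floordiv_mul_add_mod k p
  rw [digit_sum, count_factors, dif_pos ⟨hk, hp⟩, dif_pos ⟨hk, hp⟩]
  set q := PySem.Int.floordiv k p with hqdef
  by_cases h0 : 0 < q
  · have ih := sub_digit_sum p hp q h0
    linear_combination ih - hq
  · have hq0 : q = 0 := by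
      have : (0:Int) ≤ q := (PySem.Int.le_floordiv_iff_mul_le (by omega)).mpr (by omega)
      omega
    rw [hq0] at hq ⊢
    rw [digit_sum, count_factors, dif_neg (by omega), dif_neg (by omega)]
    linarith
termination_by k.toNat
decreasing_by exact pv_floordiv_toNat_lt _ _ hk (by omega)

theorem count_factors_eq_legendre (p : Int) (hp : 2 ≤ p) (k : Int) :
    count_factors k p = legendre k p := by
  by_cases hk : k ≤ 0
  · rw [legendre, if_pos hk, count_factors, dif_neg (by omega)]
  · push Not at hk
    rw [legendre, if_neg (by omega), sub_digit_sum p hp k hk,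
        PySem.Int.floordiv_eq_ediv_of_pos (by omega : (0:Int) < p - 1),
        Int.mul_ediv_cancel_left _ (by omega : p - 1 ≠ 0)]

-- ===== VERDICT (by name: the statement is the Claim_ definition above) =====
theorem count_zeros_spec : Claim_equal_count_zeros := by
  intro n m _
  unfold Spec_count_zeros count_zeros count_zeros_alt
  rw [count_factors_eq_legendre 2 (by norm_num), count_factors_eq_legendre 2 (by norm_num),
      count_factors_eq_legendre 2 (by norm_num), count_factors_eq_legendre 5 (by norm_num),
      count_factors_eq_legendre 5 (by norm_num), count_factors_eq_legendre 5 (by norm_num)]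
  congr 1 <;> ring
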